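-- pv_equiv track=rewrite | github.com/sagidana/cai | src/cai/screen/modes.py | _motion_b
-- ===== SOURCE A (Python) =====
-- def _is_word_char(ch: str) -> bool:
--     """True for characters that belong to a vim 'word' (alnum + underscore)."""
--     return ch.isalnum() or ch == '_'
--
-- def _motion_b(plain: str, col: int) -> int:
--     """Return column after moving backward one word (vim `b`)."""
--     n = len(plain)
--     if n == 0 or col <= 0:
--         return 0
--     col = min(col, n) - 1
--     # Skip whitespace backward
--     while col > 0 and plain[col].isspace():
--         col -= 1
--     if col < 0:
--         return 0
--     # Skip word or punctuation backward
--     if _is_word_char(plain[col]):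
--         while col > 0 and _is_word_char(plain[col - 1]):
--             col -= 1
--     elif not plain[col].isspace():
--         while col > 0 and not plain[col - 1].isspace() and not _is_word_char(plain[col - 1]):
--             col -= 1
--     return col
-- ===== SOURCE B (Python) =====
-- def _char_class(ch: str) -> int:
--     """0 = whitespace, 1 = vim word char (alnum/underscore), 2 = other punctuation."""
--     if ch.isspace():
--         return 0
--     if ch.isalnum() or ch == '_':
--         return 1
--     return 2
--
-- def _motion_b(plain: str, col: int) -> int:
--     """Return column after moving backward one word (vim `b`).
--
--     Single forward pass: track the start index of the current run of
--     equal-class non-space characters; the answer is the start of the last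
--     such run at or before the cursor."""
--     n = len(plain)
--     if n == 0 or col <= 0:
--         return 0
--     j = min(col, n) - 1
--     result = 0
--     prev = 0
--     for i in range(j + 1):
--         c = _char_class(plain[i])
--         if c != 0 and c != prev:
--             result = i
--         prev = c
--     return result
-- ===== Notes on version B (the rewrite author's own statement) =====
-- stated objective: alternative
-- what changed: A scans backward with a whitespace-skip loop followed by two branch-specific skip loops; B makes one forward pass over plain[0..min(col,n)-1] tracking the start index of the current run of equal-class non-space characters and returns the last such run start.
import Mathlib
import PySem

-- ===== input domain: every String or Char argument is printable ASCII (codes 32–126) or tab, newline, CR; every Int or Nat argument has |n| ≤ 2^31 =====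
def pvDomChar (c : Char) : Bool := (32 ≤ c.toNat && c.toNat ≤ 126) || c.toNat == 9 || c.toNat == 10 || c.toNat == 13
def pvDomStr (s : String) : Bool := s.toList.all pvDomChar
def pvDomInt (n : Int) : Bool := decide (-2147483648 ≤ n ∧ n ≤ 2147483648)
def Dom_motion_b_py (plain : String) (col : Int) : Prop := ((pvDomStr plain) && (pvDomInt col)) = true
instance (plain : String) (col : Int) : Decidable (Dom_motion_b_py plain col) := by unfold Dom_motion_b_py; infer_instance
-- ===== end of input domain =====

-- B replaces A's backward whitespace-skip plus two branch-specific backward skip loops by ONE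
-- forward pass that tracks the start of the current run of equal-class non-space characters
-- (objective: alternative — a genuinely different traversal, same cost).

-- ===== PORT A =====
-- _is_word_char(ch)
def pvIsWordCharA (ch : Char) : Bool := PySem.Chars.isalnum ch || ch == '_'

-- `while col > 0 and plain[col].isspace(): col -= 1` (the index is always in range, so ?.getD is exact)
def pvSkipSpaceA (l : List Char) : Nat → Nat
  | 0 => 0
  | k+1 => if PySem.Chars.isspace (l[k+1]?.getD ' ') then pvSkipSpaceA l k else k+1

-- `while col > 0 and _is_word_char(plain[col - 1]): col -= 1`
def pvSkipWordA (l : List Char) : Nat → Nat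
  | 0 => 0
  | k+1 => if pvIsWordCharA (l[k]?.getD ' ') then pvSkipWordA l k else k+1

-- `while col > 0 and not plain[col - 1].isspace() and not _is_word_char(plain[col - 1]): col -= 1`
def pvSkipPunctA (l : List Char) : Nat → Nat
  | 0 => 0
  | k+1 => if !PySem.Chars.isspace (l[k]?.getD ' ') && !pvIsWordCharA (l[k]?.getD ' ') then pvSkipPunctA l k else k+1

def motion_b_py (plain : String) (col : Int) : Int :=
  let l := plain.toList
  let n := l.length
  if n = 0 ∨ col ≤ 0 then 0
  else
    -- col = min(col, n) - 1 : here 1 ≤ col and 1 ≤ n, so this is a Nat ≥ 0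
    let col1 : Nat := (min col (n : Int)).toNat - 1
    let col2 := pvSkipSpaceA l col1
    -- Python's `if col < 0: return 0` is unreachable: col2 : Nat is never < 0
    if pvIsWordCharA (l[col2]?.getD ' ') then (pvSkipWordA l col2 : Int)
    else if !PySem.Chars.isspace (l[col2]?.getD ' ') then (pvSkipPunctA l col2 : Int)
    else (col2 : Int)

-- ===== PORT B =====
-- _char_class(ch)
def pvCharClassB (ch : Char) : Nat :=
  if PySem.Chars.isspace ch then 0
  else if PySem.Chars.isalnum ch || ch == '_' then 1
  else 2

def motion_b_py_alt (plain : String) (col : Int) : Int :=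
  let l := plain.toList
  let n := l.length
  if n = 0 ∨ col ≤ 0 then 0
  else
    let j : Nat := (min col (n : Int)).toNat - 1
    -- for i in range(j + 1): one forward pass with state (result, prev)
    let st := (List.range (j+1)).foldl
      (fun (s : Nat × Nat) i =>
        let c := pvCharClassB (l[i]?.getD ' ')
        (if c ≠ 0 ∧ c ≠ s.2 then i else s.1, c)) (0, 0)
    (st.1 : Int)

-- ===== PRECONDITION & SPEC =====
def Spec_motion_b_py (plain : String) (col : Int) (out : Int) : Prop := out = motion_b_py_alt plain col
instance (plain : String) (col : Int) (out : Int) : Decidable (Spec_motion_b_py plain col out) := by unfold Spec_motion_b_py; infer_instance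

-- ===== CLAIM (what is proved, stated in full; the proofs are below) =====
def Claim_equal_motion_b_py : Prop := ∀ (plain : String) (col : Int), Dom_motion_b_py plain col → Spec_motion_b_py plain col (motion_b_py plain col)

-- ===== LEMMAS AND PROOFS =====

-- a vim word character is never whitespace (ASCII range arithmetic)
lemma pvWord_not_space {ch : Char} (h : PySem.Chars.isspace ch = true) :
    pvIsWordCharA ch = false := by
  rcases ch with ⟨v, hv⟩
  simp [pvIsWordCharA, PySem.Chars.isspace, PySem.Chars.isalnum, PySem.Chars.isalpha,
    PySem.Chars.isdigit, PySem.Chars.isupper, PySem.Chars.islower, Char.le_def, Char.ext_iff,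
    UInt32.le_iff_toNat_le, ← UInt32.toNat_inj] at *
  omega

lemma pvCls0 {ch : Char} (h : PySem.Chars.isspace ch = true) : pvCharClassB ch = 0 := by
  simp [pvCharClassB, h]

lemma pvCls1 {ch : Char} (hw : pvIsWordCharA ch = true) : pvCharClassB ch = 1 := by
  have hs : PySem.Chars.isspace ch = false := by
    cases h : PySem.Chars.isspace ch
    · rfl
    · rw [pvWord_not_space h] at hw; exact absurd hw (by simp)
  simp only [pvIsWordCharA, Bool.or_eq_true, beq_iff_eq] at hw
  simp only [pvCharClassB, hs, Bool.false_eq_true, if_false, Bool.or_eq_true, beq_iff_eq]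
  rcases hw with h | h <;> simp [h]

lemma pvCls2 {ch : Char} (hs : PySem.Chars.isspace ch = false) (hw : pvIsWordCharA ch = false) :
    pvCharClassB ch = 2 := by
  simp only [pvIsWordCharA, Bool.or_eq_false_iff, beq_eq_false_iff_ne] at hw
  simp only [pvCharClassB, hs, Bool.false_eq_true, if_false, Bool.or_eq_true, beq_iff_eq]
  simp [hw.1, hw.2]

-- reference function: start of the last run of equal-class non-space characters in l[0..j]
def pvG (l : List Char) : Nat → Nat
  | 0 => 0
  | j+1 =>
    let c := pvCharClassB (l[j+1]?.getD ' ')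
    if c = 0 then pvG l j
    else if c = pvCharClassB (l[j]?.getD ' ') then pvG l j
    else j+1

-- the else-branch of A's body, as a function of the clamped index
def pvACore (l : List Char) (j : Nat) : Nat :=
  if pvIsWordCharA (l[pvSkipSpaceA l j]?.getD ' ') then pvSkipWordA l (pvSkipSpaceA l j)
  else if !PySem.Chars.isspace (l[pvSkipSpaceA l j]?.getD ' ') then pvSkipPunctA l (pvSkipSpaceA l j)
  else pvSkipSpaceA l j

lemma pvSkipSpaceA_of_not_space (l : List Char) (j : Nat)
    (h : PySem.Chars.isspace (l[j]?.getD ' ') = false) : pvSkipSpaceA l j = j := by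
  cases j with
  | zero => rfl
  | succ m => simp [pvSkipSpaceA, h]

lemma pvACore_eq_pvG (l : List Char) (j : Nat) : pvACore l j = pvG l j := by
  induction j with
  | zero =>
      simp only [pvACore, pvSkipSpaceA, pvSkipWordA, pvSkipPunctA, pvG]
      split_ifs <;> rfl
  | succ m ih =>
      by_cases hs : PySem.Chars.isspace (l[m+1]?.getD ' ') = true
      · -- whitespace at m+1: both recurse to index m
        have h1 : pvACore l (m+1) = pvACore l m := by
          unfold pvACore
          rw [show pvSkipSpaceA l (m+1) = pvSkipSpaceA l m by simp [pvSkipSpaceA, hs]]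
        have h2 : pvG l (m+1) = pvG l m := by
          simp only [pvG]
          rw [pvCls0 hs]
          simp
        rw [h1, h2, ih]
      · -- non-space at m+1
        simp only [Bool.not_eq_true] at hs
        have hskip : pvSkipSpaceA l (m+1) = m+1 := by simp [pvSkipSpaceA, hs]
        by_cases hw : pvIsWordCharA (l[m+1]?.getD ' ') = true
        · -- word char: class 1
          have hc := pvCls1 hw
          have hA : pvACore l (m+1) = pvSkipWordA l (m+1) := by
            unfold pvACore; rw [hskip, hw]; simp
          by_cases hwj : pvIsWordCharA (l[m]?.getD ' ') = true
          · -- previous char also class 1: both keep scanning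
            have hsj : PySem.Chars.isspace (l[m]?.getD ' ') = false := by
              cases h : PySem.Chars.isspace (l[m]?.getD ' ')
              · rfl
              · rw [pvWord_not_space h] at hwj; exact absurd hwj (by simp)
            have hcj := pvCls1 hwj
            have hA2 : pvACore l m = pvSkipWordA l m := by
              unfold pvACore; rw [pvSkipSpaceA_of_not_space l m hsj, hwj]; simp
            have hG : pvG l (m+1) = pvG l m := by
              simp only [pvG]; rw [hc, hcj]; simp
            rw [hA, hG, show pvSkipWordA l (m+1) = pvSkipWordA l m by simp [pvSkipWordA, hwj],
              ← hA2, ih]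
          · -- previous char not class 1: stop at m+1
            simp only [Bool.not_eq_true] at hwj
            have hcj : pvCharClassB (l[m]?.getD ' ') ≠ 1 := by
              cases h : PySem.Chars.isspace (l[m]?.getD ' ')
              · rw [pvCls2 h hwj]; omega
              · rw [pvCls0 h]; omega
            have hG : pvG l (m+1) = m+1 := by
              simp only [pvG]; rw [hc]
              simp [Ne.symm hcj]
            rw [hA, hG]
            simp [pvSkipWordA, hwj]
        · -- punctuation: class 2
          simp only [Bool.not_eq_true] at hw
          have hc := pvCls2 hs hw
          have hA : pvACore l (m+1) = pvSkipPunctA l (m+1) := by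
            unfold pvACore; rw [hskip, hw, hs]; simp
          by_cases hsj : PySem.Chars.isspace (l[m]?.getD ' ') = true
          · -- previous is whitespace: stop at m+1
            have hcj := pvCls0 hsj
            have hG : pvG l (m+1) = m+1 := by
              simp only [pvG]; rw [hc, hcj]; simp
            rw [hA, hG]
            simp [pvSkipPunctA, hsj]
          · simp only [Bool.not_eq_true] at hsj
            by_cases hwj : pvIsWordCharA (l[m]?.getD ' ') = true
            · -- previous is a word char: stop at m+1
              have hcj := pvCls1 hwj
              have hG : pvG l (m+1) = m+1 := by
                simp only [pvG]; rw [hc, hcj]; simp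
              rw [hA, hG]
              simp [pvSkipPunctA, hwj]
            · -- previous also punctuation: both keep scanning
              simp only [Bool.not_eq_true] at hwj
              have hcj := pvCls2 hsj hwj
              have hA2 : pvACore l m = pvSkipPunctA l m := by
                unfold pvACore; rw [pvSkipSpaceA_of_not_space l m hsj, hwj, hsj]; simp
              have hG : pvG l (m+1) = pvG l m := by
                simp only [pvG]; rw [hc, hcj]; simp
              rw [hA, hG, show pvSkipPunctA l (m+1) = pvSkipPunctA l m by
                simp [pvSkipPunctA, hsj, hwj], ← hA2, ih]

lemma pvFoldB (l : List Char) (j : Nat) :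
    (List.range (j+1)).foldl
      (fun (s : Nat × Nat) i =>
        let c := pvCharClassB (l[i]?.getD ' ')
        (if c ≠ 0 ∧ c ≠ s.2 then i else s.1, c)) (0, 0)
      = (pvG l j, pvCharClassB (l[j]?.getD ' ')) := by
  induction j with
  | zero => simp [List.range_succ, pvG]
  | succ m ih =>
      rw [List.range_succ, List.foldl_append, ih]
      simp only [List.foldl_cons, List.foldl_nil, pvG, Prod.mk.injEq]
      refine ⟨?_, trivial⟩
      by_cases h0 : pvCharClassB (l[m+1]?.getD ' ') = 0
      · simp [h0]
      · by_cases h1 : pvCharClassB (l[m+1]?.getD ' ') = pvCharClassB (l[m]?.getD ' ')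
        · simp [h1]
        · simp [h0, h1]

theorem pv_core (plain : String) (col : Int) :
    motion_b_py plain col = motion_b_py_alt plain col := by
  unfold motion_b_py motion_b_py_alt
  by_cases h : plain.toList.length = 0 ∨ col ≤ 0
  · rw [if_pos h, if_pos h]
  · simp only [h, if_false]
    rw [pvFoldB]
    have h2 := pvACore_eq_pvG plain.toList ((min col (plain.toList.length : Int)).toNat - 1)
    unfold pvACore at h2
    split_ifs at h2 ⊢ <;> simp only [String.length_toList] at h2 <;> simp [h2]

-- ===== VERDICT (by name: the statement is the Claim_ definition above) =====
theorem motion_b_py_spec : Claim_equal_motion_b_py := by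
  intro plain col _
  unfold Spec_motion_b_py
  exact pv_core plain col
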